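-- pv_equiv track=rewrite | github.com/aws-solutions/cost-optimizer-for-amazon-workspaces | source/workspaces_app/workspaces_app/__tests__/test_metrics_helper.py | user_connected_data_factory
-- ===== SOURCE A (Python) =====
-- def user_connected_data_factory(indices, length):
--     user_connected_data = []
--     for i in range(length):
--         if i in indices:
--             user_connected_data.append(1)
--         else:
--             user_connected_data.append(0)
--     return user_connected_data
-- ===== SOURCE B (Python) =====
-- def user_connected_data_factory(indices, length):
--     result = [0] * length
--     for idx in indices:
--         if 0 <= idx < length:
--             result[idx] = 1
--     return result
-- ===== Notes on version B (the rewrite author's own statement) =====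
-- stated objective: faster
-- what changed: Replaces the scan over every position with an O(length) membership test each by a zero-fill plus a single scatter pass over the indices, setting result[idx]=1 for in-range indices.
import Mathlib
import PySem

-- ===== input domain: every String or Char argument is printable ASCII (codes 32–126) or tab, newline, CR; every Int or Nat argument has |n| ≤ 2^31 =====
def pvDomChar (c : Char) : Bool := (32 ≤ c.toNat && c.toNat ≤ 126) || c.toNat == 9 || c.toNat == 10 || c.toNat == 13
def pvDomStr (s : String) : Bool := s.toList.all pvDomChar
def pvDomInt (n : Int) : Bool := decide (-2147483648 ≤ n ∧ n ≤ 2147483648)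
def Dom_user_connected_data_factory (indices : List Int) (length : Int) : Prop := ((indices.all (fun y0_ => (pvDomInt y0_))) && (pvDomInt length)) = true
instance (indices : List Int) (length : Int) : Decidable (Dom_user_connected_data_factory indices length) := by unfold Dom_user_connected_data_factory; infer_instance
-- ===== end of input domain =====

-- B replaces A's position-by-position membership scan by a zero-fill plus one scatter pass over the indices (faster).

-- ===== PORT A =====
-- for i in range(length): append 1 if i in indices else 0
def user_connected_data_factory (indices : List Int) (length : Int) : List Int :=
  (PySem.List.pyRange 0 length 1).foldl
    (fun acc i => if indices.contains i then acc ++ [1] else acc ++ [0]) []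

-- ===== PORT B =====
-- result = [0]*length; for idx in indices: if 0 <= idx < length: result[idx] = 1
def user_connected_data_factory_alt (indices : List Int) (length : Int) : List Int :=
  indices.foldl
    (fun res idx => if 0 ≤ idx ∧ idx < length then res.set idx.toNat 1 else res)
    (List.replicate length.toNat 0)

-- ===== PRECONDITION & SPEC =====
def Spec_user_connected_data_factory (indices : List Int) (length : Int) (out : List Int) : Prop := out = user_connected_data_factory_alt indices length
instance (indices : List Int) (length : Int) (out : List Int) : Decidable (Spec_user_connected_data_factory indices length out) := by unfold Spec_user_connected_data_factory; infer_instance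

-- ===== CLAIM (what is proved, stated in full; the proofs are below) =====
def Claim_equal_user_connected_data_factory : Prop := ∀ (indices : List Int) (length : Int), Dom_user_connected_data_factory indices length → Spec_user_connected_data_factory indices length (user_connected_data_factory indices length)

-- ===== LEMMAS AND PROOFS =====

-- A's append-loop is the map of the indicator over the range
theorem foldl_append_indicator (indices : List Int) (l acc : List Int) :
    l.foldl (fun acc i => if indices.contains i then acc ++ [1] else acc ++ [0]) acc
      = acc ++ l.map (fun i => if indices.contains i then (1 : Int) else 0) := by
  induction l generalizing acc with
  | nil => simp
  | cons x xs ih =>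
    simp only [List.foldl_cons, List.map_cons]
    rw [ih]
    split <;> simp

-- B's scatter loop preserves length
theorem scatter_length (indices : List Int) (length : Int) (init : List Int) :
    (indices.foldl (fun res idx => if 0 ≤ idx ∧ idx < length then res.set idx.toNat 1 else res) init).length
      = init.length := by
  induction indices generalizing init with
  | nil => rfl
  | cons x xs ih =>
    simp only [List.foldl_cons]
    rw [ih]
    split <;> simp

-- the element of B's scatter result at position j
theorem scatter_get (indices : List Int) (length : Int) (init : List Int)
    (hinit : init.length = length.toNat) (j : Nat) (hj : j < init.length) :
    (indices.foldl (fun res idx => if 0 ≤ idx ∧ idx < length then res.set idx.toNat 1 else res) init)[j]'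
        (by rw [scatter_length]; exact hj)
      = if (j : Int) ∈ indices then 1 else init[j] := by
  induction indices generalizing init with
  | nil => simp
  | cons x xs ih =>
    simp only [List.foldl_cons]
    have hlen : (if 0 ≤ x ∧ x < length then init.set x.toNat 1 else init).length = init.length := by
      split <;> simp
    have hj' : j < (if 0 ≤ x ∧ x < length then init.set x.toNat 1 else init).length := by
      rw [hlen]; exact hj
    rw [ih _ (by rw [hlen]; exact hinit) hj']
    by_cases hmem : (j : Int) ∈ xs
    · simp [hmem]
    · simp only [hmem, if_false, List.mem_cons, or_false]
      by_cases hx : 0 ≤ x ∧ x < length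
      · simp only [hx, and_self, if_true, List.getElem_set]
        by_cases hjx : (j : Int) = x
        · have : x.toNat = j := by omega
          simp [this, hjx]
        · have : x.toNat ≠ j := by omega
          simp [this, hjx]
      · have hjx : (j : Int) ≠ x := by
          intro h
          apply hx
          have hjl : (j : Int) < length := by omega
          exact ⟨by omega, by omega⟩
        simp [hx, hjx]

-- ===== VERDICT (by name: the statement is the Claim_ definition above) =====
theorem user_connected_data_factory_spec : Claim_equal_user_connected_data_factory := by
  intro indices length _
  unfold Spec_user_connected_data_factory user_connected_data_factory user_connected_data_factory_alt
  rw [foldl_append_indicator, List.nil_append, PySem.List.pyRange_one]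
  apply List.ext_getElem
  · rw [scatter_length]; simp
  · intro j h1 h2
    have hj : j < (List.replicate length.toNat (0 : Int)).length := by
      rw [scatter_length] at h2; exact h2
    rw [scatter_get indices length _ (by simp) j hj]
    simp only [List.getElem_map, List.getElem_range, List.getElem_replicate, zero_add]
    by_cases hmem : (j : Int) ∈ indices <;> simp [hmem]
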